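-- pv_equiv track=rewrite | github.com/Juanma1909/ADA | 4ta tarea/popping.py | solve
-- ===== SOURCE A (Python) =====
-- def pop(a,j):
-- 	n = len(a)-1
-- 	a = list(a)
-- 	if j == 0:
-- 		new = a[1:]
-- 	elif j == n:
-- 		new= a[:j]
-- 	else:
-- 		left = a[:j]
-- 		right = a[j+1:]
-- 		suma = left[len(left)-1]+right[0]
-- 		new = left[:len(left)-1] + [suma] + right[1:]
-- 	return new
--
-- def solve(coded):
-- 	ans = False
-- 	if len(coded) == 0:
-- 		ans = True
-- 	else:
-- 		for i in range(len(coded)):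
-- 			if coded[i] > 1:
-- 				ans = ans or solve(pop(coded,i))
-- 	return ans
-- ===== SOURCE B (Python) =====
-- def solve(coded):
--     memo = {}
--
--     def merge(t, i):
--         if i == 0:
--             return t[1:]
--         if i == len(t) - 1:
--             return t[:-1]
--         return t[:i-1] + (t[i-1] + t[i+1],) + t[i+2:]
--
--     def go(t):
--         if not t:
--             return True
--         if t in memo:
--             return memo[t]
--         res = any(go(merge(t, i)) for i in range(len(t)) if t[i] > 1)
--         memo[t] = res
--         return res
--
--     return go(tuple(coded))
-- ===== Notes on version B (the rewrite author's own statement) =====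
-- stated objective: alternative
-- what changed: B memoizes the reachability search on the state tuple (a dict of already-decided states threaded through a short-circuiting DFS), so each distinct reachable state is solved once instead of being re-explored; the number of distinct states can itself still grow exponentially, so no asymptotic speed claim is made.
import Mathlib
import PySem

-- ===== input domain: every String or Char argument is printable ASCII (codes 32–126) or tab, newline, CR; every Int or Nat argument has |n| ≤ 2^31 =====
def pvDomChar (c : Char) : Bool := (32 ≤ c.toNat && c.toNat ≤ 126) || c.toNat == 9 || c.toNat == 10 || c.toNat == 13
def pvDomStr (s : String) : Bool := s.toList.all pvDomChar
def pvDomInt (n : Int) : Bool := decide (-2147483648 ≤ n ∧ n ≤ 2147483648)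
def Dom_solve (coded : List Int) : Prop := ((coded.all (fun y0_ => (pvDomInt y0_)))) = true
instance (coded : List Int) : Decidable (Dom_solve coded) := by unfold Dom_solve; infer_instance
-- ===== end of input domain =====

-- B memoizes the reachability search on the state list (a dict of already-decided states
-- threaded through a short-circuiting DFS), so each distinct reachable state is solved once.

-- ===== PORT A =====
def pop (a : List Int) (j : Int) : List Int :=
  let n : Int := (a.length : Int) - 1
  if j = 0 then PySem.List.slice a (some 1) none
  else if j = n then PySem.List.slice a none (some j)
  else
    let left := PySem.List.slice a none (some j)
    let right := PySem.List.slice a (some (j + 1)) none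
    let suma := PySem.List.pyGetD left ((left.length : Int) - 1) 0 + PySem.List.pyGetD right 0 0
    PySem.List.slice left none (some ((left.length : Int) - 1)) ++ [suma] ++ PySem.List.slice right (some 1) none

def solveF : Nat → List Int → Bool
  | 0, _ => true
  | fuel + 1, coded =>
    if coded.length = 0 then true
    else
      (PySem.List.pyRange 0 (coded.length : Int) 1).foldl
        (fun ans i =>
          if PySem.List.pyGetD coded i 0 > 1 then ans || solveF fuel (pop coded i) else ans)
        false

def solve (coded : List Int) : Bool := solveF coded.length coded

-- ===== PORT B =====
def mergeB (t : List Int) (i : Nat) : List Int :=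
  if i = 0 then t.drop 1
  else if i = t.length - 1 then t.dropLast
  else t.take (i - 1) ++ [t.getD (i - 1) 0 + t.getD (i + 1) 0] ++ t.drop (i + 2)

mutual
def goB : Nat → List Int → PySem.Dict (List Int) Bool → Bool × PySem.Dict (List Int) Bool
  | 0, _, memo => (true, memo)
  | fuel + 1, t, memo =>
    if t = [] then (true, memo)
    else
      match memo.get? t with
      | some v => (v, memo)
      | none =>
        let r := anyB fuel t (List.range t.length) memo
        (r.1, r.2.insert t r.1)
termination_by fuel _ _ => (2 * fuel, 0)

def anyB : Nat → List Int → List Nat → PySem.Dict (List Int) Bool → Bool × PySem.Dict (List Int) Bool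
  | _, _, [], memo => (false, memo)
  | fuel, t, i :: is, memo =>
    if t.getD i 0 > 1 then
      let r := goB fuel (mergeB t i) memo
      if r.1 then (true, r.2) else anyB fuel t is r.2
    else anyB fuel t is memo
termination_by fuel _ is _ => (2 * fuel + 1, is.length)
end

def solve_alt (coded : List Int) : Bool := (goB coded.length coded PySem.Dict.empty).1

-- ===== PRECONDITION & SPEC =====
def Spec_solve (coded : List Int) (out : Bool) : Prop := out = solve_alt coded
instance (coded : List Int) (out : Bool) : Decidable (Spec_solve coded out) := by unfold Spec_solve; infer_instance

-- ===== CLAIM (what is proved, stated in full; the proofs are below) =====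
def Claim_equal_solve : Prop := ∀ (coded : List Int), Dom_solve coded → Spec_solve coded (solve coded)

-- ===== LEMMAS AND PROOFS =====

theorem mergeB_length_lt (t : List Int) (i : Nat) (hi : i < t.length) :
    (mergeB t i).length < t.length := by
  unfold mergeB
  split_ifs <;> simp [List.length_dropLast] <;> omega

theorem mergeB_eq_pop (t : List Int) (i : Nat) (hi : i < t.length) :
    mergeB t i = pop t (i : Int) := by
  unfold mergeB pop
  by_cases h0 : i = 0
  · subst h0
    simp [PySem.List.slice_from_one, List.drop_one]
  · have h0' : ((i : Int)) ≠ 0 := by exact_mod_cast h0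
    by_cases hl : i = t.length - 1
    · have hcast : ((t.length : Int) - 1) = ((t.length - 1 : Nat) : Int) := by omega
      rw [if_neg h0, if_pos hl, if_neg h0',
        if_pos (show (i : Int) = (t.length : Int) - 1 by omega),
        PySem.List.slice_to_natCast, List.dropLast_eq_take, hl]
    · have hl' : (i : Int) ≠ (t.length : Int) - 1 := by omega
      have h1 : 1 ≤ i := by omega
      have h2 : i + 1 < t.length := by omega
      rw [if_neg h0, if_neg hl, if_neg h0', if_neg hl']
      dsimp only
      have e1 : PySem.List.slice t none (some (i : Int)) = t.take i :=
        PySem.List.slice_to_natCast t i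
      have e2 : PySem.List.slice t (some ((i : Int) + 1)) none = t.drop (i + 1) := by
        have : ((i : Int) + 1) = ((i + 1 : Nat) : Int) := by push_cast; ring
        rw [this, PySem.List.slice_from_natCast]
      rw [e1, e2]
      have hlen : (t.take i).length = i := by simp; omega
      have e3 : ((t.take i).length : Int) - 1 = ((i - 1 : Nat) : Int) := by
        rw [hlen]; omega
      have g1 : PySem.List.slice (t.take i) none (some ((i - 1 : Nat) : Int)) = t.take (i - 1) := by
        rw [PySem.List.slice_to_natCast, List.take_take]
        congr 1; omega
      have g2 : PySem.List.pyGetD (t.take i) ((i - 1 : Nat) : Int) 0 = t.getD (i - 1) 0 := by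
        rw [PySem.List.pyGetD_natCast]
        simp [List.getD, List.getElem?_take_of_lt (show i - 1 < i by omega)]
      have g3 : PySem.List.pyGetD (t.drop (i + 1)) 0 0 = t.getD (i + 1) 0 := by
        rw [PySem.List.pyGetD_zero]
        simp [List.getD, List.getElem?_drop]
      have g4 : PySem.List.slice (t.drop (i + 1)) (some 1) none = t.drop (i + 2) := by
        rw [PySem.List.slice_from_one, List.tail_drop]
      rw [e3, g1, g2, g3, g4]

theorem any_congr_mem {α : Type} {l : List α} {p q : α → Bool}
    (h : ∀ a ∈ l, p a = q a) : l.any p = l.any q := by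
  induction l with
  | nil => rfl
  | cons x xs ih =>
    simp only [List.any_cons, h x (by simp), ih (fun a ha => h a (by simp [ha]))]

theorem foldl_orif {α : Type} (p : α → Prop) [DecidablePred p] (g : α → Bool)
    (l : List α) (b : Bool) :
    l.foldl (fun ans x => if p x then ans || g x else ans) b
      = (b || l.any (fun x => decide (p x) && g x)) := by
  induction l generalizing b with
  | nil => simp
  | cons x xs ih =>
    by_cases h : p x <;> simp [h, ih, Bool.or_assoc]

theorem solveF_succ (fuel : Nat) (t : List Int) (h : t ≠ []) :
    solveF (fuel + 1) t
      = (List.range t.length).any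
          (fun i => decide (t.getD i 0 > 1) && solveF fuel (pop t (i : Int))) := by
  rw [solveF]
  rw [if_neg (by simpa using h)]
  rw [foldl_orif (p := fun i => PySem.List.pyGetD t i 0 > 1)
      (g := fun i => solveF fuel (pop t i))]
  simp only [PySem.List.pyRange_one, List.any_map]
  rw [show ((t.length : Int) - 0).toNat = t.length by omega]
  apply any_congr_mem
  intro i _
  simp [PySem.List.pyGetD_natCast, List.getD]

theorem pop_length_lt (t : List Int) (i : Nat) (hi : i < t.length) :
    (pop t (i : Int)).length < t.length := by
  rw [← mergeB_eq_pop t i hi]; exact mergeB_length_lt t i hi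

theorem solveF_eq_solve : ∀ fuel t, t.length ≤ fuel → solveF fuel t = solve t := by
  intro fuel
  induction fuel using Nat.strong_induction_on with
  | _ fuel ih =>
    intro t ht
    match fuel, t with
    | 0, t =>
      have : t = [] := List.eq_nil_of_length_eq_zero (Nat.le_zero.mp ht)
      subst this; rfl
    | fuel + 1, [] => rfl
    | fuel + 1, x :: xs =>
      set t := x :: xs with hdef
      have hne : t ≠ [] := by simp [hdef]
      obtain ⟨k, hk⟩ : ∃ k, t.length = k + 1 := ⟨xs.length, by simp [hdef]⟩
      rw [solveF_succ fuel t hne, solve, hk, solveF_succ k t hne, hk]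
      apply any_congr_mem
      intro i hmem
      have hi : i < t.length := by rw [hk]; exact List.mem_range.mp hmem
      have hlt := pop_length_lt t i hi
      congr 1
      rw [ih fuel (by omega) _ (by omega), ih k (by omega) _ (by omega)]

theorem solve_unfold (t : List Int) (h : t ≠ []) :
    solve t = (List.range t.length).any
        (fun i => decide (t.getD i 0 > 1) && solve (pop t (i : Int))) := by
  obtain ⟨k, hk⟩ : ∃ k, t.length = k + 1 :=
    ⟨t.length - 1, by cases t <;> simp_all⟩
  rw [solve, hk, solveF_succ k t h, hk]
  apply any_congr_mem
  intro i hmem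
  have hi : i < t.length := by rw [hk]; exact List.mem_range.mp hmem
  congr 1
  exact solveF_eq_solve k _ (by have := pop_length_lt t i hi; omega)

def MemoInv (memo : PySem.Dict (List Int) Bool) : Prop :=
  ∀ k v, memo.get? k = some v → v = solve k

theorem anyB_correct (fuel : Nat)
    (hgo : ∀ (t : List Int) (memo : PySem.Dict (List Int) Bool), t.length ≤ fuel → MemoInv memo →
      (goB fuel t memo).1 = solve t ∧ MemoInv (goB fuel t memo).2) :
    ∀ (is : List Nat) (t : List Int) (memo : PySem.Dict (List Int) Bool),
      t.length ≤ fuel + 1 → (∀ i ∈ is, i < t.length) → MemoInv memo →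
      (anyB fuel t is memo).1
          = is.any (fun i => decide (t.getD i 0 > 1) && solve (pop t (i : Int)))
        ∧ MemoInv (anyB fuel t is memo).2 := by
  intro is
  induction is with
  | nil => intro t memo _ _ hm; simpa [anyB] using hm
  | cons i is ih =>
    intro t memo hlen his hm
    have hi : i < t.length := his i (by simp)
    by_cases hc : t.getD i 0 > 1
    · have hml : (mergeB t i).length ≤ fuel := by
        have := mergeB_length_lt t i hi; omega
      obtain ⟨h1, h2⟩ := hgo (mergeB t i) memo hml hm
      have h1' : solve (pop t (i : Int)) = (goB fuel (mergeB t i) memo).1 := by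
        rw [h1, mergeB_eq_pop t i hi]
      by_cases hr : (goB fuel (mergeB t i) memo).1 = true
      · rw [anyB, if_pos hc]
        simp only [hr, if_true]
        have hc' : 1 < t[i]?.getD 0 := by simpa [List.getD] using hc
        exact ⟨by simp [hc', h1', hr], h2⟩
      · have hr' : (goB fuel (mergeB t i) memo).1 = false := by
          cases h : (goB fuel (mergeB t i) memo).1 <;> simp_all
        obtain ⟨h3, h4⟩ := ih t (goB fuel (mergeB t i) memo).2 hlen
          (fun j hj => his j (by simp [hj])) h2
        rw [anyB, if_pos hc]
        simp only [hr', Bool.false_eq_true, if_false]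
        have hc' : 1 < t[i]?.getD 0 := by simpa [List.getD] using hc
        exact ⟨by simp [h3, hc', h1', hr'], h4⟩
    · obtain ⟨h3, h4⟩ := ih t memo hlen (fun j hj => his j (by simp [hj])) hm
      rw [anyB, if_neg hc]
      have hc' : ¬ 1 < t[i]?.getD 0 := by simpa [List.getD] using hc
      exact ⟨by simp [h3, hc'], h4⟩

theorem goB_correct : ∀ (fuel : Nat) (t : List Int) (memo : PySem.Dict (List Int) Bool),
    t.length ≤ fuel → MemoInv memo →
    (goB fuel t memo).1 = solve t ∧ MemoInv (goB fuel t memo).2 := by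
  intro fuel
  induction fuel with
  | zero =>
    intro t memo ht hm
    have : t = [] := List.eq_nil_of_length_eq_zero (Nat.le_zero.mp ht)
    subst this
    rw [goB]
    exact ⟨rfl, hm⟩
  | succ fuel ih =>
    intro t memo ht hm
    by_cases hne : t = []
    · subst hne
      rw [goB, if_pos rfl]
      exact ⟨rfl, hm⟩
    · rw [goB]
      rw [if_neg hne]
      cases hget : memo.get? t with
      | some v =>
        exact ⟨hm t v hget, hm⟩
      | none =>
        obtain ⟨h1, h2⟩ := anyB_correct fuel ih (List.range t.length) t memo ht
          (fun i hi => List.mem_range.mp hi) hm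
        refine ⟨?_, ?_⟩
        · show (anyB fuel t (List.range t.length) memo).1 = solve t
          rw [h1, ← solve_unfold t hne]
        · show MemoInv ((anyB fuel t (List.range t.length) memo).2.insert t
            (anyB fuel t (List.range t.length) memo).1)
          intro k v hkv
          rw [PySem.Dict.get?_insert] at hkv
          by_cases hk : k = t
          · subst hk
            rw [if_pos rfl] at hkv
            have : v = (anyB fuel k (List.range k.length) memo).1 := by
              exact (Option.some.inj hkv).symm
            rw [this, h1, ← solve_unfold k hne]
          · rw [if_neg hk] at hkv
            exact h2 k v hkv

-- ===== VERDICT (by name: the statement is the Claim_ definition above) =====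
theorem solve_spec : Claim_equal_solve := by
  intro coded _
  unfold Spec_solve solve_alt
  have h := goB_correct coded.length coded PySem.Dict.empty le_rfl
    (by intro k v hv; simp [PySem.Dict.get?_empty] at hv)
  exact h.1.symm
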